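-- pv_equiv track=rewrite | github.com/nicholas-holland-901/cell_est_pygame_platformer | runtime_editor.py | round_to_tile
-- ===== SOURCE A (Python) =====
-- def round_to_tile(mouse_pos):
--     x = 0
--     y = 0
--     # Get tile horizontally
--     for i in range(48):
--         if i * 20 <= mouse_pos[0] <= i * 20 + 20:
--             x = i * 20
--     # Get tile vertically
--     for i in range(27):
--         if i * 20 <= mouse_pos[1] <= i * 20 + 20:
--             y = i * 20
--     return x, y
-- ===== SOURCE B (Python) =====
-- def round_to_tile(mouse_pos):
--     def snap(c, n):
--         i = min(c // 20, n - 1)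
--         return 20 * i if 0 <= c <= 20 * i + 20 else 0
--     return snap(mouse_pos[0], 48), snap(mouse_pos[1], 27)
-- ===== Notes on version B (the rewrite author's own statement) =====
-- stated objective: simpler
-- what changed: Replaces the two fixed-range scanning loops (last match wins) with a per-axis closed form: integer-divide by 20, clamp to the last valid tile index, and return 20*i only when the coordinate lies in that tile's closed range, else 0.
import Mathlib
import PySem

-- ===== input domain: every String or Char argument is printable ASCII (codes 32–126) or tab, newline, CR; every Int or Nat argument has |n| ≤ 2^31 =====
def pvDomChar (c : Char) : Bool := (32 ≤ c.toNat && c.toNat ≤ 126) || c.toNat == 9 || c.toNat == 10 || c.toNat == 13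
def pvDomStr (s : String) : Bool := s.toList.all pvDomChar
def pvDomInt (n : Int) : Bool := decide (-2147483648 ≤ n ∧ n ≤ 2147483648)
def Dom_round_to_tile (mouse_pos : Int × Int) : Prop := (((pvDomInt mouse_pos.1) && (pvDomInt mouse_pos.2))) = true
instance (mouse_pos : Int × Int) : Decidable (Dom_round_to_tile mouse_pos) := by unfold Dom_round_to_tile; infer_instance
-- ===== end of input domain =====

-- B replaces A's two fixed-range scanning loops with a per-axis closed form (divide by 20, clamp, range check); objective: simpler.

-- ===== PORT A =====
-- the loop body of 'for i in range(n): if i*20 <= c <= i*20+20: v = i*20'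
def pvScanStep (c : Int) (acc : Int) (i : Int) : Int :=
  if i * 20 ≤ c ∧ c ≤ i * 20 + 20 then i * 20 else acc

def round_to_tile (mouse_pos : Int × Int) : Int × Int :=
  let x := (PySem.List.pyRange 0 48 1).foldl (pvScanStep mouse_pos.1) 0
  let y := (PySem.List.pyRange 0 27 1).foldl (pvScanStep mouse_pos.2) 0
  (x, y)

-- ===== PORT B =====
-- snap(c, n): i = min(c // 20, n - 1); 20*i if 0 <= c <= 20*i + 20 else 0
def pvSnap (c : Int) (n : Int) : Int :=
  let i := min (PySem.Int.floordiv c 20) (n - 1)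
  if 0 ≤ c ∧ c ≤ 20 * i + 20 then 20 * i else 0

def round_to_tile_alt (mouse_pos : Int × Int) : Int × Int :=
  (pvSnap mouse_pos.1 48, pvSnap mouse_pos.2 27)

-- ===== PRECONDITION & SPEC =====
def Spec_round_to_tile (mouse_pos : Int × Int) (out : Int × Int) : Prop := out = round_to_tile_alt mouse_pos
instance (mouse_pos : Int × Int) (out : Int × Int) : Decidable (Spec_round_to_tile mouse_pos out) := by unfold Spec_round_to_tile; infer_instance

-- ===== CLAIM (what is proved, stated in full; the proofs are below) =====
def Claim_equal_round_to_tile : Prop := ∀ (mouse_pos : Int × Int), Dom_round_to_tile mouse_pos → Spec_round_to_tile mouse_pos (round_to_tile mouse_pos)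

-- ===== LEMMAS AND PROOFS =====

-- A's scan over range(n) equals B's closed form, for every n ≥ 1
theorem pvScan_eq_snap (c : Int) (n : Nat) (hn : 1 ≤ n) :
    (PySem.List.pyRange 0 n 1).foldl (pvScanStep c) 0 = pvSnap c n := by
  induction n with
  | zero => omega
  | succ m ih =>
    rcases Nat.lt_or_ge m 1 with hm | hm
    · interval_cases m
      push_cast
      have h1 : PySem.List.pyRange 0 1 1 = [0] := by decide
      rw [h1]
      simp only [List.foldl, pvScanStep, pvSnap,
        PySem.Int.floordiv_eq_ediv_of_pos (by omega : (0:Int) < 20)]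
      split_ifs <;> omega
    · push_cast
      rw [PySem.List.pyRange_one_succ_right (by omega), List.foldl_append, ih hm]
      simp only [List.foldl, pvScanStep, pvSnap,
        PySem.Int.floordiv_eq_ediv_of_pos (by omega : (0:Int) < 20)]
      split_ifs <;> omega

-- ===== VERDICT (by name: the statement is the Claim_ definition above) =====
theorem round_to_tile_spec : Claim_equal_round_to_tile := by
  intro p _
  unfold Spec_round_to_tile round_to_tile round_to_tile_alt
  rw [show ((48:Int)) = ((48:Nat):Int) by norm_num, show ((27:Int)) = ((27:Nat):Int) by norm_num,
    pvScan_eq_snap p.1 48 (by omega), pvScan_eq_snap p.2 27 (by omega)]
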